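-- pv_equiv track=rewrite | github.com/LauraaMolinaa/security-project | scripts/vigenere.py | extract_message_from_ascii_art
-- ===== SOURCE A (Python) =====
-- def extract_message_from_ascii_art(ascii_art):
--     binary_data = ""
--     for line in ascii_art.splitlines():
--         for char in line:
--             if char == '#':
--                 binary_data += '1'
--             elif char == '*':
--                 binary_data += '0'
--
--     if not binary_data:
--         raise ValueError("No hidden message found in ASCII art.")
--
--     # Convert binary to text
--     message = ''.join(chr(int(binary_data[i:i + 8], 2)) for i in range(0, len(binary_data), 8))
--     return message
-- ===== SOURCE B (Python) =====
-- def extract_message_from_ascii_art(ascii_art):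
--     # single pass: shift bits into val, flush every 8 bits (plus a short trailing chunk)
--     val = 0
--     cnt = 0
--     out = []
--     for ch in ascii_art:
--         if ch == '#':
--             bit = 1
--         elif ch == '*':
--             bit = 0
--         else:
--             continue
--         val = (val << 1) | bit
--         cnt += 1
--         if cnt == 8:
--             out.append(chr(val))
--             val = 0
--             cnt = 0
--     if cnt == 0 and not out:
--         raise ValueError("No hidden message found in ASCII art.")
--     if cnt:
--         out.append(chr(val))
--     return ''.join(out)
-- ===== Notes on version B (the rewrite author's own statement) =====
-- stated objective: alternative
-- what changed: B fuses A's two phases (build a '0'/'1' string, then re-scan it in 8-character slices with int(chunk,2)) into a single pass that shifts each bit into an accumulator and flushes a character every 8 bits, never materialising the intermediate binary string.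
import Mathlib
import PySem

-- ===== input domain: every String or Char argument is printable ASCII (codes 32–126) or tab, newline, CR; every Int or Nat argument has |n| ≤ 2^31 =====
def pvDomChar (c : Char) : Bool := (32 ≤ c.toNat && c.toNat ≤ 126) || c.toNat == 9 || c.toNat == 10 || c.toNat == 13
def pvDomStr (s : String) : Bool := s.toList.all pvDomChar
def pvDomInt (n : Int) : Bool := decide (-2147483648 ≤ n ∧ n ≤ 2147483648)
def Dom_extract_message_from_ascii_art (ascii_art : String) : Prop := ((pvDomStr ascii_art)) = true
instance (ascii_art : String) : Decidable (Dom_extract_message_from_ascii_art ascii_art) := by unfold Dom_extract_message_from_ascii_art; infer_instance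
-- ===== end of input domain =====

-- B fuses A's two phases (build a '0'/'1' string from '#'/'*', then re-scan it in 8-char slices) into one bit-shifting pass; proved to return the same string on Pre_.


-- ===== PORT A =====
-- hand port of int(chunk, 2); exact on the nonempty '0'/'1' strings A ever passes to it
def pvBinVal (cs : List Char) : Nat :=
  cs.foldl (fun a c => 2 * a + (if c = '1' then 1 else 0)) 0

def extract_message_from_ascii_art (ascii_art : String) : String :=
  let binary_data : List Char :=
    (PySem.Str.splitlines ascii_art).foldl (fun bd line =>
      line.toList.foldl (fun bd ch =>
        if ch = '#' then bd ++ ['1']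
        else if ch = '*' then bd ++ ['0']
        else bd) bd) []
  -- 'if not binary_data: raise ValueError(...)' — exactly the inputs Pre_ excludes
  let message : List Char :=
    (PySem.List.pyRange 0 (binary_data.length : Int) 8).foldl (fun acc i =>
      acc ++ [Char.ofNat (pvBinVal (PySem.List.slice binary_data (some i) (some (i + 8))))]) []
  String.ofList message

-- ===== PORT B =====
-- one loop step of B: shift a bit into (val, cnt, out), flushing a character when cnt reaches 8
def pvStep (st : Nat × Nat × List Char) (b : Nat) : Nat × Nat × List Char :=
  match st with
  | (val, cnt, out) =>
    let val := 2 * val + b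
    let cnt := cnt + 1
    if cnt = 8 then (0, 0, out ++ [Char.ofNat val]) else (val, cnt, out)

def extract_message_from_ascii_art_alt (ascii_art : String) : String :=
  let fin := ascii_art.toList.foldl (fun st ch =>
      if ch = '#' then pvStep st 1
      else if ch = '*' then pvStep st 0
      else st) (0, 0, [])
  match fin with
  | (val, cnt, out) =>
    -- 'if cnt == 0 and not out: raise ValueError(...)' — exactly the inputs Pre_ excludes
    String.ofList (if cnt ≠ 0 then out ++ [Char.ofNat val] else out)

-- ===== PRECONDITION & SPEC =====
-- Both A and B raise ValueError when the input contains no '#' or '*' at all; Pre_ excludes exactly those inputs.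
def Pre_extract_message_from_ascii_art (ascii_art : String) : Prop :=
  (ascii_art.toList.any (fun c => c = '#' || c = '*')) = true
instance (ascii_art : String) : Decidable (Pre_extract_message_from_ascii_art ascii_art) := by
  unfold Pre_extract_message_from_ascii_art; infer_instance

def pvWitness_extract_message_from_ascii_art : String := "#*##*#*#\n*#"

def Spec_extract_message_from_ascii_art (ascii_art : String) (out : String) : Prop := out = extract_message_from_ascii_art_alt ascii_art
instance (ascii_art : String) (out : String) : Decidable (Spec_extract_message_from_ascii_art ascii_art out) := by unfold Spec_extract_message_from_ascii_art; infer_instance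

-- ===== CLAIM (what is proved, stated in full; the proofs are below) =====
def Claim_equal_extract_message_from_ascii_art : Prop := ∀ (ascii_art : String), Dom_extract_message_from_ascii_art ascii_art → Pre_extract_message_from_ascii_art ascii_art → Spec_extract_message_from_ascii_art ascii_art (extract_message_from_ascii_art ascii_art)

-- ===== LEMMAS AND PROOFS =====

-- the '0'/'1' characters hidden in a character list
def pvBits (l : List Char) : List Char :=
  l.filterMap (fun c => if c = '#' then some '1' else if c = '*' then some '0' else none)

-- chunk a bit string into bytes, MSB first, short trailing chunk allowed
def pvDecode : List Char → List Char
  | [] => []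
  | c :: l => Char.ofNat (pvBinVal ((c :: l).take 8)) :: pvDecode ((c :: l).drop 8)
termination_by l => l.length
decreasing_by simp

-- flattening splitlines keeps exactly the non-break characters
theorem pv_go_flatten (isB : Char → Bool) (h10 : isB '\n' = true) (h13 : isB '\x0d' = true)
    (l cur : List Char) (acc : List (List Char)) :
    (PySem.Chars.splitlines.go isB l cur acc).flatten
      = acc.reverse.flatten ++ cur.reverse ++ l.filter (fun c => !isB c) := by
  induction l, cur, acc using PySem.Chars.splitlines.go.induct isB with
  | case1 cur acc h =>
    simp_all [PySem.Chars.splitlines.go, List.isEmpty_iff]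
  | case2 cur acc h =>
    rw [PySem.Chars.splitlines.go]
    simp_all
  | case3 rest cur acc ih =>
    rw [PySem.Chars.splitlines.go]
    simp [ih, h10, h13]
  | case4 c rest cur acc hne hB ih =>
    rw [PySem.Chars.splitlines.go]
    · simp [ih, hB]
    · exact hne
  | case5 c rest cur acc hne hB ih =>
    rw [PySem.Chars.splitlines.go]
    · simp [ih, hB]
    · exact hne

-- bits ignore split-line break characters
theorem pv_bits_filter (isB : Char → Bool) (hH : isB '#' = false) (hS : isB '*' = false)
    (l : List Char) : pvBits (l.filter (fun c => !isB c)) = pvBits l := by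
  induction l with
  | nil => rfl
  | cons c l ih =>
    by_cases hB : isB c = true
    · have h1 : c ≠ '#' := by rintro rfl; simp_all
      have h2 : c ≠ '*' := by rintro rfl; simp_all
      simp [pvBits, hB, h1, h2] at *
      exact ih
    · simp [pvBits, hB] at *
      rw [List.filterMap_cons, List.filterMap_cons]
      cases h : (if c = '#' then some '1' else if c = '*' then some '0' else none) <;> simp [ih]

theorem pv_bits_flatten (L : List (List Char)) :
    pvBits L.flatten = (L.map pvBits).flatten := by
  induction L with
  | nil => rfl
  | cons a L ih => simp [pvBits, List.filterMap_append] at *; rw [ih]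

-- inner loop of A's first phase
theorem pv_inner (line : List Char) (bd : List Char) :
    line.foldl (fun bd ch =>
      if ch = '#' then bd ++ ['1']
      else if ch = '*' then bd ++ ['0']
      else bd) bd = bd ++ pvBits line := by
  induction line generalizing bd with
  | nil => simp [pvBits]
  | cons c l ih =>
    simp only [List.foldl_cons, pvBits, List.filterMap_cons]
    by_cases h1 : c = '#'
    · simp [h1, ih, pvBits]
    · by_cases h2 : c = '*' <;> simp [h1, h2, ih, pvBits]

-- A's first phase builds exactly the hidden bit string
theorem pv_binary (s : String) :
    (PySem.Str.splitlines s).foldl (fun bd line =>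
      line.toList.foldl (fun bd ch =>
        if ch = '#' then bd ++ ['1']
        else if ch = '*' then bd ++ ['0']
        else bd) bd) [] = pvBits s.toList := by
  simp only [pv_inner]
  simp only [PySem.List.foldl_append_eq_flatMap, List.nil_append]
  rw [List.flatMap_def]
  rw [show (List.map (fun (x : String) => pvBits x.toList) (PySem.Str.splitlines s))
      = List.map pvBits (List.map String.toList (PySem.Str.splitlines s)) by
        rw [List.map_map]; rfl]
  rw [← pv_bits_flatten, PySem.Str.splitlines_map_toList s]
  rw [PySem.Chars.splitlines]
  rw [pv_go_flatten _ (by decide) (by decide)]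
  simp only [List.reverse_nil, List.flatten_nil, List.nil_append]
  exact pv_bits_filter _ (by decide) (by decide) _

-- slices at multiples of 8 are take-8-of-drop
theorem pv_slice8 (bd : List Char) (k : Nat) :
    PySem.List.slice bd (some ((8 : Int) * k)) (some ((8 : Int) * k + 8)) = (bd.drop (8 * k)).take 8 := by
  have h1 : ((8 : Int) * k) = ((8 * k : Nat) : Int) := by push_cast; ring
  have h2 : ((8 : Int) * k + 8) = ((8 * k : Nat) : Int) + ((8 : Nat) : Int) := by push_cast; ring
  rw [h2, h1, PySem.List.slice_natCast_add]

-- the map over byte indices is pvDecode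
theorem pv_chunk_map (m : Nat) : ∀ bd : List Char, (((bd.length : Int) + 7) / 8).toNat = m →
    (List.range m).map (fun k => Char.ofNat (pvBinVal ((bd.drop (8 * k)).take 8))) = pvDecode bd := by
  induction m with
  | zero =>
    intro bd h
    have : bd.length = 0 := by omega
    rw [List.length_eq_zero_iff] at this
    subst this
    simp [pvDecode]
  | succ m ih =>
    intro bd h
    match bd with
    | [] => simp at h
    | c :: l =>
      rw [List.range_succ_eq_map, List.map_cons, List.map_map]
      rw [pvDecode]
      congr 1
      have hlen : ((((List.drop 7 l).length : Int) + 7) / 8).toNat = m := by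
        simp only [List.length_drop, List.length_cons] at *
        push_cast at *
        omega
      have h8 : List.drop 8 (c :: l) = List.drop 7 l := rfl
      rw [h8, ← ih _ hlen]
      apply List.map_congr_left
      intro k _
      have h1 : 8 * Nat.succ k = (8 * k + 7) + 1 := by omega
      simp only [Function.comp_apply, h1, List.drop_succ_cons, List.drop_drop]
      rw [Nat.add_comm 7 (8 * k)]

-- A computes the chunked decoding of the hidden bit string
theorem pv_A_eq (s : String) :
    extract_message_from_ascii_art s = String.ofList (pvDecode (pvBits s.toList)) := by
  unfold extract_message_from_ascii_art
  rw [pv_binary]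
  dsimp only
  set bd := pvBits s.toList with hbd
  have hcnt : (if (0:Int) < (bd.length : Int)
      then (((bd.length : Int) - 0 + 8 - 1) / 8).toNat else 0) = (((bd.length : Int) + 7) / 8).toNat := by
    split_ifs with h
    · congr 1; omega
    · omega
  rw [PySem.List.pyRange_of_pos 0 (bd.length : Int) (by norm_num), hcnt]
  rw [List.foldl_map]
  simp only [PySem.List.foldl_append_eq_flatMap, List.nil_append]
  have hfm : ∀ (f : Nat → Char) (l : List Nat), List.flatMap (fun x => [f x]) l = l.map f := by
    intro f l; induction l <;> simp_all
  rw [hfm]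
  congr 1
  rw [← pv_chunk_map (((bd.length : Int) + 7) / 8).toNat bd rfl]
  apply List.map_congr_left
  intro k _
  simp only [zero_add]
  rw [pv_slice8]

-- B's fold only looks at the bit characters
theorem pv_B_bits (l : List Char) (st : Nat × Nat × List Char) :
    l.foldl (fun st ch =>
      if ch = '#' then pvStep st 1
      else if ch = '*' then pvStep st 0
      else st) st
    = (pvBits l).foldl (fun st c => pvStep st (if c = '1' then 1 else 0)) st := by
  induction l generalizing st with
  | nil => rfl
  | cons c l ih =>
    by_cases h1 : c = '#'
    · simp [h1, pvBits, ih]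
    · by_cases h2 : c = '*' <;> simp [h1, h2, pvBits, ih]

theorem pv_binval_append (p : List Char) (c : Char) :
    pvBinVal (p ++ [c]) = 2 * pvBinVal p + (if c = '1' then 1 else 0) := by
  simp [pvBinVal, List.foldl_append]

def pvFinish (st : Nat × Nat × List Char) : List Char :=
  match st with
  | (val, cnt, out) => if cnt ≠ 0 then out ++ [Char.ofNat val] else out

theorem pv_decode_block (q bl : List Char) (hq : q.length = 8) :
    pvDecode (q ++ bl) = Char.ofNat (pvBinVal q) :: pvDecode bl := by
  match q with
  | [] => simp at hq
  | a :: r =>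
    rw [show (a :: r) ++ bl = a :: (r ++ bl) from rfl, pvDecode]
    have ht : (a :: (r ++ bl)).take 8 = a :: r := by
      rw [show a :: (r ++ bl) = (a :: r) ++ bl from rfl, ← hq, List.take_left]
    have hd : (a :: (r ++ bl)).drop 8 = bl := by
      rw [show a :: (r ++ bl) = (a :: r) ++ bl from rfl, ← hq, List.drop_left]
    rw [ht, hd]

-- the single-pass loop computes the chunked decoding
theorem pv_B_loop (bl : List Char) : ∀ (p : List Char) (out : List Char), p.length < 8 →
    pvFinish (bl.foldl (fun st c => pvStep st (if c = '1' then 1 else 0)) (pvBinVal p, p.length, out))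
      = out ++ pvDecode (p ++ bl) := by
  induction bl with
  | nil =>
    intro p out hp
    match p with
    | [] => simp [pvFinish, pvDecode, pvBinVal]
    | c :: q =>
      simp only [List.append_nil, List.foldl_nil, pvFinish]
      rw [pvDecode]
      have ht : (c :: q).take 8 = c :: q := List.take_of_length_le hp.le
      have hd : (c :: q).drop 8 = [] := List.drop_eq_nil_of_le hp.le
      rw [ht, hd]
      simp [pvDecode]
  | cons b bl ih =>
    intro p out hp
    simp only [List.foldl_cons]
    have hstep : pvStep (pvBinVal p, p.length, out) (if b = '1' then 1 else 0)
        = if p.length + 1 = 8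
          then (0, 0, out ++ [Char.ofNat (pvBinVal (p ++ [b]))])
          else (pvBinVal (p ++ [b]), (p ++ [b]).length, out) := by
      simp [pvStep, pv_binval_append]
    rw [hstep]
    by_cases h8 : p.length + 1 = 8
    · rw [if_pos h8]
      have h0 : ((0 : Nat), (0 : Nat), out ++ [Char.ofNat (pvBinVal (p ++ [b]))])
          = (pvBinVal ([] : List Char), ([] : List Char).length, out ++ [Char.ofNat (pvBinVal (p ++ [b]))]) := by
        simp [pvBinVal]
      rw [h0, ih [] _ (by simp)]
      have hlen : (p ++ [b]).length = 8 := by simp; omega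
      have hassoc : p ++ b :: bl = (p ++ [b]) ++ bl := by simp
      rw [hassoc, List.nil_append, pv_decode_block _ _ hlen]
      simp
    · rw [if_neg h8]
      rw [ih (p ++ [b]) out (by simp; omega)]
      simp

-- B computes the same chunked decoding
theorem pv_B_eq (s : String) :
    extract_message_from_ascii_art_alt s = String.ofList (pvDecode (pvBits s.toList)) := by
  unfold extract_message_from_ascii_art_alt
  dsimp only
  rw [pv_B_bits]
  show String.ofList (pvFinish ((pvBits s.toList).foldl
      (fun st c => pvStep st (if c = '1' then 1 else 0)) (0, 0, []))) = _
  congr 1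
  have h0 : ((0 : Nat), (0 : Nat), ([] : List Char))
      = (pvBinVal [], ([] : List Char).length, ([] : List Char)) := by simp [pvBinVal]
  rw [h0, pv_B_loop _ [] [] (by simp)]
  simp

-- ===== VERDICT (by name: the statement is the Claim_ definition above) =====
theorem extract_message_from_ascii_art_spec : Claim_equal_extract_message_from_ascii_art := by
  intro s _ _
  unfold Spec_extract_message_from_ascii_art
  rw [pv_A_eq, pv_B_eq]
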